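-- pv_equiv track=rewrite | github.com/bhavinisai/listening-between-the-lines | src/diarize_and_label.py | detect_host_segments
-- ===== SOURCE A (Python) =====
-- YOUTUBE_HOST_KEYWORDS = [
--     "subscribe", "hit the subscribe button", "subscribe to the channel",
--     "subscribe to my channel", "don't forget to subscribe",
--     "like and subscribe", "subscribe below", "click subscribe",
--     "hit the bell", "notification bell", "smash that subscribe",
--     "leave a like", "hit the like button", "thumbs up",
--     "check out the description", "link in the description",
--     "patreon", "support the channel", "support the show",
-- ]
--
-- SPONSOR_KEYWORDS = [
--     "sponsor", "brought to you by", "today's sponsor",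
--     "this episode is sponsored", "this podcast is brought",
--     "promo code", "discount code", "coupon code",
--     "percent off", "% off", "discount",
--     "audible", "squarespace", "hellofresh", "betterhelp",
--     "nordvpn", "athletic greens",
--     "before we get started", "before we dive in",
--     "quick word from our sponsor", "message from our sponsor",
-- ]
--
-- def contains_keywords(text, keywords):
--     """Check if text contains any keyword (case-insensitive)."""
--     text_lower = text.lower()
--     return any(kw.lower() in text_lower for kw in keywords)
--
-- def detect_host_segments(segments):
--     """Detect YouTube CTA and sponsor segments."""
--     youtube_segs = []
--     sponsor_segs = []
--
--     for i, seg in enumerate(segments):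
--         text = seg.get('text', '')
--
--         if contains_keywords(text, YOUTUBE_HOST_KEYWORDS):
--             youtube_segs.append(i)
--         elif contains_keywords(text, SPONSOR_KEYWORDS):
--             sponsor_segs.append(i)
--
--     if youtube_segs:
--         return youtube_segs, "youtube_cta"
--     elif sponsor_segs:
--         return sponsor_segs, "sponsor"
--
--     return [], "none"
-- ===== SOURCE B (Python) =====
-- YOUTUBE_HOST_KEYWORDS = [
--     "subscribe", "hit the subscribe button", "subscribe to the channel",
--     "subscribe to my channel", "don't forget to subscribe",
--     "like and subscribe", "subscribe below", "click subscribe",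
--     "hit the bell", "notification bell", "smash that subscribe",
--     "leave a like", "hit the like button", "thumbs up",
--     "check out the description", "link in the description",
--     "patreon", "support the channel", "support the show",
-- ]
--
-- SPONSOR_KEYWORDS = [
--     "sponsor", "brought to you by", "today's sponsor",
--     "this episode is sponsored", "this podcast is brought",
--     "promo code", "discount code", "coupon code",
--     "percent off", "% off", "discount",
--     "audible", "squarespace", "hellofresh", "betterhelp",
--     "nordvpn", "athletic greens",
--     "before we get started", "before we dive in",
--     "quick word from our sponsor", "message from our sponsor",
-- ]
--
-- def contains_keywords(text, keywords):
--     text_lower = text.lower()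
--     return any(kw.lower() in text_lower for kw in keywords)
--
-- def detect_host_segments(segments):
--     # Pass 1: youtube CTA wins globally; if any segment matches, return at once.
--     youtube_segs = [i for i, seg in enumerate(segments)
--                     if contains_keywords(seg.get('text', ''), YOUTUBE_HOST_KEYWORDS)]
--     if youtube_segs:
--         return youtube_segs, "youtube_cta"
--     # Pass 2 runs only when NO segment matched youtube, so no per-segment
--     # exclusion is needed: just collect sponsor matches.
--     sponsor_segs = [i for i, seg in enumerate(segments)
--                     if contains_keywords(seg.get('text', ''), SPONSOR_KEYWORDS)]
--     if sponsor_segs: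
--         return sponsor_segs, "sponsor"
--     return [], "none"
-- ===== Notes on version B (the rewrite author's own statement) =====
-- stated objective: simpler
-- what changed: Replaces A's single fused loop with two interleaved accumulators by two short-circuited comprehension passes: a youtube pass that returns immediately if non-empty, then a sponsor pass with no per-segment youtube exclusion (sound because it only runs when no segment matched youtube).
import Mathlib
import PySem

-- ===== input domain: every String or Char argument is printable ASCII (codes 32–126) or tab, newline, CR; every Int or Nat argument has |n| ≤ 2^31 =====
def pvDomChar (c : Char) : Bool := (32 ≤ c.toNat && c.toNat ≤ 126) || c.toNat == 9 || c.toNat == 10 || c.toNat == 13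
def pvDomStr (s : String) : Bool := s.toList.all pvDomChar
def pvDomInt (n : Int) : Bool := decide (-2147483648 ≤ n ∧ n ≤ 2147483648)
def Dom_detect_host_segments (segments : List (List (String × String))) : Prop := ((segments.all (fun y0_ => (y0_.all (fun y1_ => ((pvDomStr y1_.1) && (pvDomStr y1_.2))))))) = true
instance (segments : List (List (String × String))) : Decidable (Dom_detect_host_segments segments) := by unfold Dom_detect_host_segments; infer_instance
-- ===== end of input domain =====

-- B replaces A's single fused loop (two interleaved accumulators, per-segment elif)
-- by two short-circuited passes: a youtube pass returned at once if non-empty, then a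
-- sponsor pass with no per-segment exclusion. Objective: simpler.

-- ===== PORT A =====
def YOUTUBE_HOST_KEYWORDS : List String := [
    "subscribe", "hit the subscribe button", "subscribe to the channel",
    "subscribe to my channel", "don't forget to subscribe",
    "like and subscribe", "subscribe below", "click subscribe",
    "hit the bell", "notification bell", "smash that subscribe",
    "leave a like", "hit the like button", "thumbs up",
    "check out the description", "link in the description",
    "patreon", "support the channel", "support the show"]

def SPONSOR_KEYWORDS : List String := [
    "sponsor", "brought to you by", "today's sponsor",
    "this episode is sponsored", "this podcast is brought",
    "promo code", "discount code", "coupon code",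
    "percent off", "% off", "discount",
    "audible", "squarespace", "hellofresh", "betterhelp",
    "nordvpn", "athletic greens",
    "before we get started", "before we dive in",
    "quick word from our sponsor", "message from our sponsor"]

def contains_keywords (text : String) (keywords : List String) : Bool :=
  let text_lower := PySem.Str.lower text
  keywords.any (fun kw => PySem.Str.isIn (PySem.Str.lower kw) text_lower)

def detect_host_segments (segments : List (List (String × String))) : List Int × String :=
  let acc := (PySem.List.enumerate segments).foldl
    (fun (acc : List Int × List Int) p =>
      let text := PySem.Dict.getD ⟨p.2⟩ "text" ""
      if contains_keywords text YOUTUBE_HOST_KEYWORDS then (acc.1 ++ [p.1], acc.2)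
      else if contains_keywords text SPONSOR_KEYWORDS then (acc.1, acc.2 ++ [p.1])
      else acc)
    ([], [])
  if acc.1 ≠ [] then (acc.1, "youtube_cta")
  else if acc.2 ≠ [] then (acc.2, "sponsor")
  else ([], "none")

-- ===== PORT B =====
def detect_host_segments_alt (segments : List (List (String × String))) : List Int × String :=
  let youtube_segs := (PySem.List.enumerate segments).filterMap
    (fun p => if contains_keywords (PySem.Dict.getD ⟨p.2⟩ "text" "") YOUTUBE_HOST_KEYWORDS
              then some p.1 else none)
  if youtube_segs ≠ [] then (youtube_segs, "youtube_cta")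
  else
    let sponsor_segs := (PySem.List.enumerate segments).filterMap
      (fun p => if contains_keywords (PySem.Dict.getD ⟨p.2⟩ "text" "") SPONSOR_KEYWORDS
                then some p.1 else none)
    if sponsor_segs ≠ [] then (sponsor_segs, "sponsor")
    else ([], "none")

-- ===== PRECONDITION & SPEC =====
def Spec_detect_host_segments (segments : List (List (String × String))) (out : List Int × String) : Prop := out = detect_host_segments_alt segments
instance (segments : List (List (String × String))) (out : List Int × String) : Decidable (Spec_detect_host_segments segments out) := by unfold Spec_detect_host_segments; infer_instance

-- ===== CLAIM (what is proved, stated in full; the proofs are below) =====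
def Claim_equal_detect_host_segments : Prop := ∀ (segments : List (List (String × String))), Dom_detect_host_segments segments → Spec_detect_host_segments segments (detect_host_segments segments)

-- ===== LEMMAS AND PROOFS =====

-- predicates on an enumerated pair, shared by the characterisations of both loops
def ytP (p : Int × List (String × String)) : Bool :=
  contains_keywords (PySem.Dict.getD ⟨p.2⟩ "text" "") YOUTUBE_HOST_KEYWORDS
def spP (p : Int × List (String × String)) : Bool :=
  contains_keywords (PySem.Dict.getD ⟨p.2⟩ "text" "") SPONSOR_KEYWORDS

-- A's fused loop computes the two filterMaps, with B's youtube comprehension first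
theorem foldlA_eq (l : List (Int × List (String × String))) (a b : List Int) :
    l.foldl (fun (acc : List Int × List Int) p =>
        if ytP p then (acc.1 ++ [p.1], acc.2)
        else if spP p then (acc.1, acc.2 ++ [p.1])
        else acc) (a, b)
    = (a ++ l.filterMap (fun p => if ytP p then some p.1 else none),
       b ++ l.filterMap (fun p => if !ytP p && spP p then some p.1 else none)) := by
  induction l generalizing a b with
  | nil => simp
  | cons h t ih =>
    by_cases hy : ytP h <;> by_cases hs : spP h <;>
      simp [List.foldl_cons, hy, hs, ih]

theorem detect_host_segments_spec' (segments : List (List (String × String))) :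
    detect_host_segments segments = detect_host_segments_alt segments := by
  unfold detect_host_segments detect_host_segments_alt
  rw [show (fun (acc : List Int × List Int) (p : Int × List (String × String)) =>
      let text := PySem.Dict.getD ⟨p.2⟩ "text" ""
      if contains_keywords text YOUTUBE_HOST_KEYWORDS then (acc.1 ++ [p.1], acc.2)
      else if contains_keywords text SPONSOR_KEYWORDS then (acc.1, acc.2 ++ [p.1])
      else acc)
    = (fun (acc : List Int × List Int) p =>
      if ytP p then (acc.1 ++ [p.1], acc.2)
      else if spP p then (acc.1, acc.2 ++ [p.1])
      else acc) from rfl]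
  rw [show (fun (p : Int × List (String × String)) =>
      if contains_keywords (PySem.Dict.getD ⟨p.2⟩ "text" "") YOUTUBE_HOST_KEYWORDS
      then some p.1 else none) = (fun p => if ytP p then some p.1 else none) from rfl]
  rw [show (fun (p : Int × List (String × String)) =>
      if contains_keywords (PySem.Dict.getD ⟨p.2⟩ "text" "") SPONSOR_KEYWORDS
      then some p.1 else none) = (fun p => if spP p then some p.1 else none) from rfl]
  rw [foldlA_eq]
  simp only [List.nil_append]
  by_cases hys : (PySem.List.enumerate segments).filterMap
      (fun p => if ytP p then some p.1 else none) = []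
  · have hall : ∀ p ∈ PySem.List.enumerate segments, ytP p = false := by
      intro p hp
      have h := (List.filterMap_eq_nil_iff.mp hys) p hp
      by_cases hy : ytP p = true
      · simp [hy] at h
      · simpa using hy
    have hcong : (PySem.List.enumerate segments).filterMap
          (fun p => if !ytP p && spP p then some p.1 else none)
        = (PySem.List.enumerate segments).filterMap
          (fun p => if spP p then some p.1 else none) :=
      List.filterMap_congr (fun p hp => by simp [hall p hp])
    rw [hys, hcong]
  · simp [hys]

-- ===== VERDICT (by name: the statement is the Claim_ definition above) =====
theorem detect_host_segments_spec : Claim_equal_detect_host_segments := by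
  intro segments _
  unfold Spec_detect_host_segments
  exact detect_host_segments_spec' segments
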